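-- pv_equiv track=rewrite | github.com/jweastman/BioRAG-AI-Template | utils.py | convert_chat_history
-- ===== SOURCE A (Python) =====
-- def convert_chat_history(role_user_chat):
--     """
--     Converts a list of chat messages into a list of tuples pairing user and response messages.
--
--     This function takes a list of chat messages, where each message is a dictionary with a
--     "content" key, and converts it into a list of tuples. Each tuple contains a pair of messages
--     (user message, response message). If the number of messages is odd, the last user message is
--     paired with an empty string.
--
--     Args:
--         role_user_chat (list of dict): A list of chat messages, where each message is a dictionary
--                                        containing a "content" key with the message text.
--
--     Returns:
--         list of tuple: A list of tuples, where each tuple contains a user message and a response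
--                        message.
--     """
--     converted_history = []
--     for i in range(0, len(role_user_chat), 2):
--         if i + 1 < len(role_user_chat):
--             converted_history.append((role_user_chat[i]["content"], role_user_chat[i + 1]["content"]))
--         else:
--             # In case there's an odd number of messages, pair the last user message with an empty string
--             converted_history.append((role_user_chat[i]["content"], ""))
--     return converted_history[-5:]
-- ===== SOURCE B (Python) =====
-- def convert_chat_history(role_user_chat):
--     # Only the last 5 pairs matter: skip directly to the tail instead of pairing everything.
--     n = len(role_user_chat)
--     pairs = (n + 1) // 2
--     tail = role_user_chat[2 * (pairs - 5):] if pairs > 5 else role_user_chat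
--     return _pair_up(tail)
--
--
-- def _pair_up(msgs):
--     if not msgs:
--         return []
--     if len(msgs) == 1:
--         return [(msgs[0]["content"], "")]
--     return [(msgs[0]["content"], msgs[1]["content"])] + _pair_up(msgs[2:])
-- ===== Notes on version B (the rewrite author's own statement) =====
-- stated objective: alternative
-- what changed: Instead of pairing all n messages with a stride-2 index loop and slicing the last 5 pairs at the end, B computes the start offset of the last 5 pairs arithmetically, slices only that tail (at most 10 messages) and pairs it by structural recursion two messages at a time.
import Mathlib
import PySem

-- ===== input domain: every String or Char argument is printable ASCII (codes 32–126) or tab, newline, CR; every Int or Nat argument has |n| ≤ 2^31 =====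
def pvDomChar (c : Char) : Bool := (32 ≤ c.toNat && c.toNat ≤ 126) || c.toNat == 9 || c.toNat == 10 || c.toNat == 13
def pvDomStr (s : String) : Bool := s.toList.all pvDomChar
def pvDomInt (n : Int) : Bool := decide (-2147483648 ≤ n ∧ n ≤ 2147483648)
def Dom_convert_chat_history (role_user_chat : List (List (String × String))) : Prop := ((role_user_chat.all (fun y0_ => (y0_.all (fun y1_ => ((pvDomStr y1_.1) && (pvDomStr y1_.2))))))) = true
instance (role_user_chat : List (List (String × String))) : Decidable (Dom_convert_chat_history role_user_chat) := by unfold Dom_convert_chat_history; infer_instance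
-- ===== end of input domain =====

-- B: instead of pairing all n messages and slicing [-5:] at the end, compute the start of the
-- last 5 pairs arithmetically, slice only that tail (≤ 10 messages) and pair it by structural
-- recursion — only the tail's "content" entries are read.

-- m["content"] on the assoc-list dict: first match; "" default is never used inside Pre_
-- (Python raises KeyError when the key is absent; such inputs are outside Pre_).
def pvContent (m : List (String × String)) : String :=
  ((m.find? (fun p => p.1 == "content")).map (·.2)).getD ""

-- ===== PORT A =====
def convert_chat_history (role_user_chat : List (List (String × String))) : List (String × String) :=
  let n : Int := role_user_chat.length
  let converted_history :=
    (PySem.List.pyRange 0 n 2).foldl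
      (fun acc i =>
        if i + 1 < n then
          acc ++ [(pvContent (PySem.List.pyGetD role_user_chat i []),
                   pvContent (PySem.List.pyGetD role_user_chat (i + 1) []))]
        else
          acc ++ [(pvContent (PySem.List.pyGetD role_user_chat i []), "")]) []
  PySem.List.slice converted_history (some (-5)) none

-- ===== PORT B =====
-- _pair_up: structural recursion two messages at a time (msgs[2:] of m1::m2::t is t)
def pvPairRec : List (List (String × String)) → List (String × String)
  | [] => []
  | [m] => [(pvContent m, "")]
  | m1 :: m2 :: t => (pvContent m1, pvContent m2) :: pvPairRec t

def convert_chat_history_alt (role_user_chat : List (List (String × String))) : List (String × String) :=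
  let n : Int := role_user_chat.length
  let pairs : Int := PySem.Int.floordiv (n + 1) 2
  let tail := if pairs > 5 then PySem.List.slice role_user_chat (some (2 * (pairs - 5))) none
              else role_user_chat
  pvPairRec tail

-- ===== PRECONDITION & SPEC =====
-- Pre_ excludes exactly the inputs where some message lacks the "content" key: Python A raises KeyError there.
def Pre_convert_chat_history (role_user_chat : List (List (String × String))) : Prop :=
  ∀ m ∈ role_user_chat, (m.find? (fun p => p.1 == "content")).isSome = true
instance (role_user_chat : List (List (String × String))) : Decidable (Pre_convert_chat_history role_user_chat) := by unfold Pre_convert_chat_history; infer_instance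

def pvWitness_convert_chat_history : (List (List (String × String))) :=
  [[("content", "hi")], [("content", "hello!")], [("content", "bye")]]

def Spec_convert_chat_history (role_user_chat : List (List (String × String))) (out : List (String × String)) : Prop := out = convert_chat_history_alt role_user_chat
instance (role_user_chat : List (List (String × String))) (out : List (String × String)) : Decidable (Spec_convert_chat_history role_user_chat out) := by unfold Spec_convert_chat_history; infer_instance

-- ===== CLAIM (what is proved, stated in full; the proofs are below) =====
def Claim_equal_convert_chat_history : Prop := ∀ (role_user_chat : List (List (String × String))), Dom_convert_chat_history role_user_chat → Pre_convert_chat_history role_user_chat → Spec_convert_chat_history role_user_chat (convert_chat_history role_user_chat)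

-- ===== LEMMAS AND PROOFS =====

-- the paired shape of the whole contents list, two strings at a time
def pvPairUp : List String → List (String × String)
  | [] => []
  | [x] => [(x, "")]
  | x :: y :: t => (x, y) :: pvPairUp t

-- B's recursion is pvPairUp of the mapped contents
theorem pvPairRec_eq (l : List (List (String × String))) :
    pvPairRec l = pvPairUp (l.map pvContent) := by
  induction l using pvPairRec.induct with
  | case1 => simp [pvPairRec, pvPairUp]
  | case2 m => simp [pvPairRec, pvPairUp]
  | case3 m1 m2 t ih => simp [pvPairRec, pvPairUp, ih]

-- dropping 2k strings before pairing = dropping k pairs after pairing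
theorem pvPairUp_drop (k : Nat) : ∀ (xs : List String),
    pvPairUp (xs.drop (2 * k)) = (pvPairUp xs).drop k := by
  induction k with
  | zero => intro xs; simp
  | succ k ih =>
      intro xs
      match xs with
      | [] => simp [pvPairUp]
      | [x] =>
          rw [List.drop_eq_nil_of_le (by simp; omega)]
          simp [pvPairUp]
      | x :: y :: t =>
          have : 2 * (k + 1) = (2 * k) + 1 + 1 := by ring
          rw [this]
          simp only [List.drop_succ_cons, pvPairUp, List.drop_succ_cons]
          exact ih t

theorem pvPairUp_length (xs : List String) :
    (pvPairUp xs).length = (xs.length + 1) / 2 := by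
  induction xs using pvPairUp.induct with
  | case1 => simp [pvPairUp]
  | case2 x => simp [pvPairUp]
  | case3 x y t ih => simp [pvPairUp, ih]; omega

-- step-2 range: cons form
theorem pvRange_two_cons (a b : Int) (h : a < b) :
    PySem.List.pyRange a b 2 = a :: PySem.List.pyRange (a + 2) b 2 := by
  rw [PySem.List.pyRange_of_pos a b (by norm_num),
      PySem.List.pyRange_of_pos (a + 2) b (by norm_num)]
  have hC : (if a < b then ((b - a + 2 - 1) / 2).toNat else 0)
      = (if a + 2 < b then ((b - (a + 2) + 2 - 1) / 2).toNat else 0) + 1 := by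
    split_ifs <;> omega
  rw [hC, List.range_succ_eq_map]
  simp [List.map_map, Function.comp]
  intro k _; omega

-- shift a step-2 range down by 2
theorem pvRange_two_shift (b : Int) :
    PySem.List.pyRange 2 b 2 = (PySem.List.pyRange 0 (b - 2) 2).map (· + 2) := by
  rw [PySem.List.pyRange_of_pos 2 b (by norm_num),
      PySem.List.pyRange_of_pos 0 (b - 2) (by norm_num)]
  have hC : (if (2:Int) < b then ((b - 2 + 2 - 1) / 2).toNat else 0)
      = (if (0:Int) < b - 2 then ((b - 2 - 0 + 2 - 1) / 2).toNat else 0) := by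
    split_ifs <;> omega
  rw [hC, List.map_map]
  apply List.map_congr_left; intro k _; simp; omega

theorem pvGetD_cons_succ (z : List (String × String)) (l : List (List (String × String))) (i : Int) (hi : 0 ≤ i) :
    PySem.List.pyGetD (z :: l) (i + 1) [] = PySem.List.pyGetD l i [] := by
  lift i to ℕ using hi with k
  rw [show ((k : Int) + 1) = ((k + 1 : Nat) : Int) by push_cast; ring,
      PySem.List.pyGetD_natCast, PySem.List.pyGetD_natCast]
  simp

-- A's loop produces pvPairUp of the contents
theorem pvLoopA : ∀ (chat : List (List (String × String))) (acc : List (String × String)),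
    (PySem.List.pyRange 0 (chat.length : Int) 2).foldl
      (fun acc i =>
        if i + 1 < (chat.length : Int) then
          acc ++ [(pvContent (PySem.List.pyGetD chat i []),
                   pvContent (PySem.List.pyGetD chat (i + 1) []))]
        else
          acc ++ [(pvContent (PySem.List.pyGetD chat i []), "")]) acc
    = acc ++ pvPairUp (chat.map pvContent) := by
  intro chat
  match chat with
  | x :: y :: t =>
      have ih := pvLoopA t
      intro acc
      have hlen : ((x :: y :: t).length : Int) = (t.length : Int) + 2 := by
        simp; ring
      rw [hlen, pvRange_two_cons 0 ((t.length : Int) + 2) (by positivity)]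
      simp only [List.foldl_cons]
      rw [show (0:Int) + 2 = 2 by ring, pvRange_two_shift, List.foldl_map]
      rw [if_pos (by omega : (0:Int) + 1 < (t.length : Int) + 2)]
      have hg0 : PySem.List.pyGetD (x :: y :: t) (0:Int) [] = x := by
        rw [show (0:Int) = ((0:Nat):Int) by simp, PySem.List.pyGetD_natCast]; simp
      have hg1 : PySem.List.pyGetD (x :: y :: t) ((0:Int) + 1) [] = y := by
        rw [show (0:Int) + 1 = ((1:Nat):Int) by simp, PySem.List.pyGetD_natCast]; simp
      rw [hg0, hg1]
      have hcong : ∀ (a : List (String × String)), ∀ i ∈ PySem.List.pyRange 0 ((t.length : Int) + 2 - 2) 2,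
          (if i + 2 + 1 < (t.length : Int) + 2 then
            a ++ [(pvContent (PySem.List.pyGetD (x :: y :: t) (i + 2) []),
                   pvContent (PySem.List.pyGetD (x :: y :: t) (i + 2 + 1) []))]
          else
            a ++ [(pvContent (PySem.List.pyGetD (x :: y :: t) (i + 2) []), "")])
          = (if i + 1 < (t.length : Int) then
            a ++ [(pvContent (PySem.List.pyGetD t i []),
                   pvContent (PySem.List.pyGetD t (i + 1) []))]
          else
            a ++ [(pvContent (PySem.List.pyGetD t i []), "")]) := by
        intro a i hi
        have hpos : (0:Int) ≤ i := by
          have := (PySem.List.mem_pyRange_iff_of_pos (by norm_num : (0:Int) < 2) i).1 hi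
          omega
        have e1 : PySem.List.pyGetD (x :: y :: t) (i + 2) [] = PySem.List.pyGetD t i [] := by
          rw [show i + 2 = (i + 1) + 1 by ring, pvGetD_cons_succ _ _ _ (by omega),
              pvGetD_cons_succ _ _ _ hpos]
        have e2 : PySem.List.pyGetD (x :: y :: t) (i + 2 + 1) [] = PySem.List.pyGetD t (i + 1) [] := by
          rw [show i + 2 + 1 = (i + 1 + 1) + 1 by ring, pvGetD_cons_succ _ _ _ (by omega),
              pvGetD_cons_succ _ _ _ (by omega)]
        have hcond : (i + 2 + 1 < (t.length : Int) + 2) ↔ (i + 1 < (t.length : Int)) := by omega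
        rw [e1, e2]
        split_ifs with h1 h2 <;> first | rfl | (exfalso; omega)
      have := PySem.List.foldl_congr_mem (PySem.List.pyRange 0 ((t.length : Int) + 2 - 2) 2) _ _
        (acc ++ [(pvContent x, pvContent y)])
        (fun a i hi => hcong a i hi)
      rw [show (t.length : Int) + 2 - 2 = (t.length : Int) by ring] at this ⊢
      rw [this, ih]
      simp [pvPairUp]
  | [] =>
      intro acc
      simp [PySem.List.pyRange_of_pos 0 0 (by norm_num : (0:Int) < 2), pvPairUp]
  | [m] =>
      intro acc
      have hr : PySem.List.pyRange 0 ((([m] : List (List (String × String))).length : Int)) 2 = [0] := by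
        rw [show ((([m] : List (List (String × String))).length : Int)) = 1 by simp,
            pvRange_two_cons 0 1 (by norm_num)]
        rw [PySem.List.pyRange_of_pos (0 + 2) 1 (by norm_num)]
        norm_num
      rw [hr]
      simp only [List.foldl_cons, List.foldl_nil]
      rw [if_neg (by simp : ¬ ((0:Int) + 1 < (([m] : List (List (String × String))).length : Int)))]
      have hg0 : PySem.List.pyGetD ([m] : List (List (String × String))) (0:Int) [] = m := by
        rw [show (0:Int) = ((0:Nat):Int) by simp, PySem.List.pyGetD_natCast]; simp
      rw [hg0]; simp [pvPairUp]

-- ===== VERDICT (by name: the statement is the Claim_ definition above) =====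
theorem convert_chat_history_spec : Claim_equal_convert_chat_history := by
  intro chat _ _
  unfold Spec_convert_chat_history convert_chat_history convert_chat_history_alt
  simp only []
  rw [pvLoopA chat []]
  set contents := chat.map pvContent with hc
  have hlen : contents.length = chat.length := by simp [hc]
  -- pairs as a Nat
  have hpairs : PySem.Int.floordiv ((chat.length : Int) + 1) 2
      = (((chat.length + 1) / 2 : Nat) : Int) := by
    rw [show ((chat.length : Int) + 1) = (((chat.length + 1 : Nat)) : Int) by push_cast; ring]
    exact_mod_cast PySem.Int.floordiv_natCast (chat.length + 1) 2
  set P : Nat := (chat.length + 1) / 2 with hP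
  -- A's side: last 5 pairs
  simp only [List.nil_append]
  rw [PySem.List.slice_from_neg_ofNat _ 5 (by omega), pvPairUp_length, hlen]
  rw [hpairs]
  by_cases h5 : 5 < P
  · rw [if_pos (by exact_mod_cast h5)]
    have hnn : (0:Int) ≤ 2 * ((P : Int) - 5) := by omega
    rw [PySem.List.slice_from _ hnn, pvPairRec_eq]
    have htn : (2 * ((P : Int) - 5)).toNat = 2 * (P - 5) := by omega
    rw [htn, List.map_drop, pvPairUp_drop]
  · rw [if_neg (by exact_mod_cast h5)]
    rw [pvPairRec_eq]
    rw [show (chat.length + 1) / 2 - 5 = 0 by omega, List.drop_zero]
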